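-- pv_equiv track=rewrite | github.com/hitczw/small_CPU | assembler.py | bin2verilog
-- ===== SOURCE A (Python) =====
-- def bin2verilog(bin_vec, str_prog):
--     rom_str = "raom"
--     res_str = ""
--     th = 0
--     for i in bin_vec:
--         if (th % 2 == 0):
--             temp_str0 = str_prog[th // 2][0] + " " + str_prog[th // 2][1]
--             res_str += '//' + temp_str0 + "\n"
--         temp_str = "raom[%d]=8'b%s;\n" % (th, i)
--         res_str += temp_str
--
--         if ((th + 1) % 2 == 0):
--             res_str += "\n"
--         th += 1
--     return res_str
-- ===== SOURCE B (Python) =====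
-- def bin2verilog(bin_vec, str_prog):
--     parts = []
--     for j in range((len(bin_vec) + 1) // 2):
--         name, arg = str_prog[j]
--         parts.append('//%s %s\n' % (name, arg))
--         parts.append("raom[%d]=8'b%s;\n" % (2 * j, bin_vec[2 * j]))
--         if 2 * j + 1 < len(bin_vec):
--             parts.append("raom[%d]=8'b%s;\n" % (2 * j + 1, bin_vec[2 * j + 1]))
--             parts.append("\n")
--     return ''.join(parts)
-- ===== Notes on version B (the rewrite author's own statement) =====
-- stated objective: alternative
-- what changed: A builds one string by += in a flat pass with a counter th and parity tests; B loops over pair indices j = 0..ceil(n/2)-1, emits each comment+ROM chunk into a parts list, and joins once at the end.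
import Mathlib
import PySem

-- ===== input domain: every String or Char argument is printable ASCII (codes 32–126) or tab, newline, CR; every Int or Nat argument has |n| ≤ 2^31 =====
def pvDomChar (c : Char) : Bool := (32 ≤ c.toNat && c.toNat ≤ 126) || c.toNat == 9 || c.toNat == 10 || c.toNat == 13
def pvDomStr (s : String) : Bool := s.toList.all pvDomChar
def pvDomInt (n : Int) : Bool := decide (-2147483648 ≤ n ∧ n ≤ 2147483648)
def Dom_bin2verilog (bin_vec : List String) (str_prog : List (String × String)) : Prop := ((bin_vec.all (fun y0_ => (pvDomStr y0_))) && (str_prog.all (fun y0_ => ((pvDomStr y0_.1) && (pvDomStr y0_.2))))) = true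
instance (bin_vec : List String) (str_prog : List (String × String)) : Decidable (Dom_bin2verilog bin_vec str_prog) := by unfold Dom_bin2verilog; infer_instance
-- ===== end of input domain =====

set_option maxRecDepth 4000


-- B replaces A's flat counter loop by a loop over pair indices that emits each
-- comment+ROM chunk into a parts list joined once at the end (objective: alternative decomposition).

-- ===== PORT A =====
-- literal transliteration of A's single pass with counter th
def bin2verilog (bin_vec : List String) (str_prog : List (String × String)) : String :=
  (bin_vec.foldl (fun (st : String × Int) i =>
      let res := st.1
      let th := st.2
      let res := if PySem.Int.mod th 2 == 0 then
          -- str_prog[th // 2]; Pre_ guarantees the index is in range, the default is unreachable there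
          let p := (PySem.List.pyGet? str_prog (PySem.Int.floordiv th 2)).getD ("", "")
          res ++ ("//" ++ (p.1 ++ " " ++ p.2) ++ "\n")
        else res
      let res := res ++ ("raom[" ++ PySem.Int.toStr th ++ "]=8'b" ++ i ++ ";\n")
      let res := if PySem.Int.mod (th + 1) 2 == 0 then res ++ "\n" else res
      (res, th + 1)) ("", (0 : Int))).1

-- ===== PORT B =====
-- literal transliteration of Source B: loop over pair index j, collect parts, join once
def bin2verilog_alt (bin_vec : List String) (str_prog : List (String × String)) : String :=
  let parts := (PySem.List.pyRange 0 (PySem.Int.floordiv ((bin_vec.length : Int) + 1) 2) 1).foldl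
    (fun (parts : List String) (j : Int) =>
      let p := (PySem.List.pyGet? str_prog j).getD ("", "")
      let parts := parts ++ ["//" ++ p.1 ++ " " ++ p.2 ++ "\n"]
      let parts := parts ++
        ["raom[" ++ PySem.Int.toStr (2 * j) ++ "]=8'b" ++ ((PySem.List.pyGet? bin_vec (2 * j)).getD "") ++ ";\n"]
      if 2 * j + 1 < (bin_vec.length : Int) then
        parts ++
          ["raom[" ++ PySem.Int.toStr (2 * j + 1) ++ "]=8'b" ++ ((PySem.List.pyGet? bin_vec (2 * j + 1)).getD "") ++ ";\n",
           "\n"]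
      else parts) []
  PySem.Str.join "" parts


-- ===== PRECONDITION & SPEC =====
-- Pre_ excludes exactly the inputs on which the Python A raises IndexError:
-- str_prog shorter than the ceil(len(bin_vec)/2) comment entries the loop reads.
def Pre_bin2verilog (bin_vec : List String) (str_prog : List (String × String)) : Prop :=
  (bin_vec.length + 1) / 2 ≤ str_prog.length
instance (bin_vec : List String) (str_prog : List (String × String)) : Decidable (Pre_bin2verilog bin_vec str_prog) := by unfold Pre_bin2verilog; infer_instance
def pvWitness_bin2verilog : List String × (List (String × String)) :=
  (["00000001", "00000010", "00000011"], [("mov", "a"), ("add", "b")])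

def Spec_bin2verilog (bin_vec : List String) (str_prog : List (String × String)) (out : String) : Prop := out = bin2verilog_alt bin_vec str_prog
instance (bin_vec : List String) (str_prog : List (String × String)) (out : String) : Decidable (Spec_bin2verilog bin_vec str_prog out) := by unfold Spec_bin2verilog; infer_instance

-- ===== CLAIM (what is proved, stated in full; the proofs are below) =====
def Claim_equal_bin2verilog : Prop := ∀ (bin_vec : List String) (str_prog : List (String × String)), Dom_bin2verilog bin_vec str_prog → Pre_bin2verilog bin_vec str_prog → Spec_bin2verilog bin_vec str_prog (bin2verilog bin_vec str_prog)

-- ===== LEMMAS AND PROOFS =====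

-- the shared chunk fragments both proofs rewrite to
def pvCmt (str_prog : List (String × String)) (k : Nat) : String :=
  let p := (PySem.List.pyGet? str_prog (k : Int)).getD ("", "")
  "//" ++ p.1 ++ " " ++ p.2 ++ "\n"
def pvRom (th : Int) (w : String) : String :=
  "raom[" ++ PySem.Int.toStr th ++ "]=8'b" ++ w ++ ";\n"

-- the common chunked shape of the output: two input words per step
def pvBrec (str_prog : List (String × String)) (k : Nat) : List String → String
  | [] => ""
  | [x] => pvCmt str_prog k ++ pvRom (2 * (k : Int)) x
  | x :: y :: rest =>
      pvCmt str_prog k ++ pvRom (2 * (k : Int)) x ++ pvRom (2 * (k : Int) + 1) y ++ "\n" ++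
        pvBrec str_prog (k + 1) rest

lemma pvMod2k (k : Nat) : PySem.Int.mod (2 * (k:Int)) 2 = 0 := by
  rw [PySem.Int.mod_eq_emod_of_pos (by omega)]; omega
lemma pvMod2k1 (k : Nat) : PySem.Int.mod (2 * (k:Int) + 1) 2 = 1 := by
  rw [PySem.Int.mod_eq_emod_of_pos (by omega)]; omega
lemma pvFd2k (k : Nat) : PySem.Int.floordiv (2 * (k:Int)) 2 = (k:Int) := by
  rw [PySem.Int.floordiv_eq_ediv_of_pos (by omega)]; omega

lemma pvA_eq_brec (str_prog : List (String × String)) :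
    ∀ (v : List String) (k : Nat) (res : String),
      (v.foldl (fun (st : String × Int) i =>
        let res := st.1
        let th := st.2
        let res := if PySem.Int.mod th 2 == 0 then
            let p := (PySem.List.pyGet? str_prog (PySem.Int.floordiv th 2)).getD ("", "")
            res ++ ("//" ++ (p.1 ++ " " ++ p.2) ++ "\n")
          else res
        let res := res ++ ("raom[" ++ PySem.Int.toStr th ++ "]=8'b" ++ i ++ ";\n")
        let res := if PySem.Int.mod (th + 1) 2 == 0 then res ++ "\n" else res
        (res, th + 1)) (res, (2 * (k : Int)))).1 = res ++ pvBrec str_prog k v := by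
  intro v k
  induction k, v using pvBrec.induct with
  | case1 k => intro res; simp [pvBrec]
  | case2 k x =>
    intro res
    simp [pvBrec, pvCmt, pvRom, List.foldl, String.append_assoc]
  | case3 k x y rest ih =>
    intro res
    have h2 : 2 * (k:Int) + 1 + 1 = 2 * ((k+1 : Nat) : Int) := by push_cast; ring
    simp only [List.foldl, pvMod2k k, pvMod2k1 k, pvFd2k k]
    simp only [h2]
    rw [ih]
    simp [pvBrec, pvCmt, pvRom, String.append_assoc]

lemma jnil : PySem.Str.join "" [] = "" := by simp [PySem.Str.join, PySem.Chars.join]; rfl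
lemma jcons (x : String) (l : List String) : PySem.Str.join "" (x :: l) = x ++ PySem.Str.join "" l := by
  cases l with
  | nil => simp [PySem.Str.join, PySem.Chars.join]; simp [List.intercalate, String.ofList_toList]
  | cons b bs => simp [PySem.Str.join, PySem.Chars.join_cons_cons, String.ofList_append, String.ofList_toList]
lemma japp (l1 l2 : List String) : PySem.Str.join "" (l1 ++ l2) = PySem.Str.join "" l1 ++ PySem.Str.join "" l2 := by
  induction l1 with
  | nil => simp [jnil]
  | cons a l ih => simp [jcons, ih, String.append_assoc]

def pvChunk (bin_vec : List String) (str_prog : List (String × String)) (j : Int) : List String :=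
  let p := (PySem.List.pyGet? str_prog j).getD ("", "")
  ["//" ++ p.1 ++ " " ++ p.2 ++ "\n",
   "raom[" ++ PySem.Int.toStr (2 * j) ++ "]=8'b" ++ ((PySem.List.pyGet? bin_vec (2 * j)).getD "") ++ ";\n"] ++
  (if 2 * j + 1 < (bin_vec.length : Int) then
    ["raom[" ++ PySem.Int.toStr (2 * j + 1) ++ "]=8'b" ++ ((PySem.List.pyGet? bin_vec (2 * j + 1)).getD "") ++ ";\n", "\n"]
  else [])

lemma pvLB (bin_vec : List String) (str_prog : List (String × String)) :
    ∀ (k : Nat) (v : List String), bin_vec.drop (2 * k) = v →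
      PySem.Str.join "" ((PySem.List.pyRange (k : Int) (((bin_vec.length + 1) / 2 : Nat) : Int) 1).flatMap
        (pvChunk bin_vec str_prog)) = pvBrec str_prog k v := by
  intro k v
  induction k, v using pvBrec.induct with
  | case1 k =>
    intro hv
    have hn : bin_vec.length ≤ 2 * k := by
      have := List.length_drop (l := bin_vec) (i := 2 * k); rw [hv] at this; simp at this; omega
    have hPk : (bin_vec.length + 1) / 2 ≤ k := by omega
    rw [PySem.List.pyRange_one_eq_nil (by exact_mod_cast hPk)]
    simp [jnil, pvBrec]
  | case2 k x =>
    intro hv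
    have hlen := List.length_drop (l := bin_vec) (i := 2 * k)
    rw [hv] at hlen; simp at hlen
    have hn : bin_vec.length = 2 * k + 1 := by omega
    have hP : (bin_vec.length + 1) / 2 = k + 1 := by omega
    have hx : bin_vec[2 * k]? = some x := by
      have h0 := List.getElem?_drop (xs := bin_vec) (i := 2 * k) (j := 0)
      rw [hv] at h0; simpa using h0.symm
    rw [hP]
    have hc : ((k + 1 : Nat) : Int) = (k : Int) + 1 := by push_cast; ring
    rw [hc, PySem.List.pyRange_one_singleton]
    have h2k : (2 * (k : Int)) = ((2 * k : Nat) : Int) := by push_cast; ring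
    have hcnd : ¬ (2 * (k:Int) + 1 < (bin_vec.length : Int)) := by rw [hn]; push_cast; omega
    simp only [pvChunk, List.flatMap_cons, List.flatMap_nil, List.append_nil]
    rw [if_neg hcnd]
    simp only [pvBrec, pvCmt, pvRom, h2k, PySem.List.pyGet?_natCast, hx, Option.getD_some]
    simp [jcons, jnil, String.append_assoc]
  | case3 k x y rest ih =>
    intro hv
    have hlen := List.length_drop (l := bin_vec) (i := 2 * k)
    rw [hv] at hlen; simp at hlen
    have hn : 2 * k + 2 ≤ bin_vec.length := by omega
    have hx : bin_vec[2 * k]? = some x := by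
      have h0 := List.getElem?_drop (xs := bin_vec) (i := 2 * k) (j := 0)
      rw [hv] at h0; simpa using h0.symm
    have hy : bin_vec[2 * k + 1]? = some y := by
      have h1 := List.getElem?_drop (xs := bin_vec) (i := 2 * k) (j := 1)
      rw [hv] at h1; simpa using h1.symm
    have hdrop : bin_vec.drop (2 * (k + 1)) = rest := by
      have := List.drop_drop (i := 2) (j := 2 * k) (l := bin_vec)
      rw [hv] at this
      simpa [show 2 * k + 2 = 2 * (k + 1) by omega] using this.symm
    have hklt : (k : Int) < (((bin_vec.length + 1) / 2 : Nat) : Int) := by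
      have : k + 1 ≤ (bin_vec.length + 1) / 2 := by omega
      exact_mod_cast this
    rw [PySem.List.pyRange_one_cons hklt]
    rw [List.flatMap_cons, japp]
    have hc : ((k : Int) + 1) = ((k + 1 : Nat) : Int) := by push_cast; ring
    rw [hc, ih hdrop]
    have h2k : (2 * (k : Int)) = ((2 * k : Nat) : Int) := by push_cast; ring
    have h2k1 : (2 * (k : Int) + 1) = ((2 * k + 1 : Nat) : Int) := by push_cast; ring
    have hcond : 2 * (k : Int) + 1 < (bin_vec.length : Int) := by
      exact_mod_cast (by omega : (2 * k + 1 : Int) < (bin_vec.length : Int))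
    simp only [pvChunk]
    rw [if_pos hcond]
    simp only [pvBrec, pvCmt, pvRom, h2k, PySem.List.pyGet?_natCast,
      hx, Option.getD_some, List.cons_append, List.nil_append]
    have hy' : (PySem.List.pyGet? bin_vec (2 * (k : Int) + 1)).getD "" = y := by
      rw [h2k1, PySem.List.pyGet?_natCast, hy]; rfl
    simp [jcons, jnil, String.append_assoc, hy']

lemma pvB_eq_brec (bin_vec : List String) (str_prog : List (String × String)) :
    bin2verilog_alt bin_vec str_prog = pvBrec str_prog 0 bin_vec := by
  unfold bin2verilog_alt
  have hstep : (fun (parts : List String) (j : Int) =>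
      let p := (PySem.List.pyGet? str_prog j).getD ("", "")
      let parts := parts ++ ["//" ++ p.1 ++ " " ++ p.2 ++ "\n"]
      let parts := parts ++
        ["raom[" ++ PySem.Int.toStr (2 * j) ++ "]=8'b" ++ ((PySem.List.pyGet? bin_vec (2 * j)).getD "") ++ ";\n"]
      if 2 * j + 1 < (bin_vec.length : Int) then
        parts ++
          ["raom[" ++ PySem.Int.toStr (2 * j + 1) ++ "]=8'b" ++ ((PySem.List.pyGet? bin_vec (2 * j + 1)).getD "") ++ ";\n",
           "\n"]
      else parts)
      = fun parts j => parts ++ pvChunk bin_vec str_prog j := by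
    funext parts j
    simp only [pvChunk]
    split <;> simp
  rw [hstep, PySem.List.foldl_append_eq_flatMap]
  have hfd : PySem.Int.floordiv ((bin_vec.length : Int) + 1) 2 = (((bin_vec.length + 1) / 2 : Nat) : Int) := by
    rw [PySem.Int.floordiv_eq_ediv_of_pos (by omega)]
    push_cast [Int.natCast_div]
    rfl
  have h0 : (0 : Int) = ((0 : Nat) : Int) := rfl
  rw [hfd, List.nil_append, h0, pvLB bin_vec str_prog 0 bin_vec (by simp)]

-- ===== VERDICT (by name: the statement is the Claim_ definition above) =====
theorem bin2verilog_spec : Claim_equal_bin2verilog := by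
  intro bin_vec str_prog _ _
  show bin2verilog bin_vec str_prog = bin2verilog_alt bin_vec str_prog
  rw [pvB_eq_brec]
  have h := pvA_eq_brec str_prog bin_vec 0 ""
  simpa [bin2verilog] using h
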